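-- pv_equiv track=rewrite | github.com/a9tavako/coding_nuggets | leetcode/151- Reverse Words in a String.py | find_next_word
-- ===== SOURCE A (Python) =====
-- def find_next_word(s, start_index):
--     if start_index > len(s) - 1 or start_index < 0:
--         raise ValueError(f"start_index: {start_index} is out of range for s: {s}")
--
--     word_start_index = -1
--     word_end_index = -1
--
--     current_index = start_index
--
--     while current_index < len(s):
--         if word_start_index != -1 and s[current_index] == " ":
--             word_end_index = current_index -1
--             return (word_start_index, word_end_index)
--
--         if word_start_index == -1 and s[current_index] != " ":
--             word_start_index = current_index
--
--         current_index += 1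
--
--     if word_start_index == -1:
--         return (len(s), len(s)) # only empty spaces.
--
--     return (word_start_index, len(s) - 1) # reached the end of s without another space character.
-- ===== SOURCE B (Python) =====
-- def find_next_word(s, start_index):
--     if start_index > len(s) - 1 or start_index < 0:
--         raise ValueError(f"start_index: {start_index} is out of range for s: {s}")
--     n = len(s)
--     sub = s[start_index:]
--     stripped = sub.lstrip(' ')
--     if not stripped:
--         return (n, n)
--     start = start_index + (len(sub) - len(stripped))
--     word = stripped.split(' ', 1)[0]
--     return (start, start + len(word) - 1)
-- ===== Notes on version B (the rewrite author's own statement) =====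
-- stated objective: faster
-- what changed: Replaces the explicit stateful per-character index scan with slicing plus string library operations: lstrip(' ') locates the word start by length difference and split(' ', 1)[0] gives the word, so B has no Python-level index loop at all.
import Mathlib
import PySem

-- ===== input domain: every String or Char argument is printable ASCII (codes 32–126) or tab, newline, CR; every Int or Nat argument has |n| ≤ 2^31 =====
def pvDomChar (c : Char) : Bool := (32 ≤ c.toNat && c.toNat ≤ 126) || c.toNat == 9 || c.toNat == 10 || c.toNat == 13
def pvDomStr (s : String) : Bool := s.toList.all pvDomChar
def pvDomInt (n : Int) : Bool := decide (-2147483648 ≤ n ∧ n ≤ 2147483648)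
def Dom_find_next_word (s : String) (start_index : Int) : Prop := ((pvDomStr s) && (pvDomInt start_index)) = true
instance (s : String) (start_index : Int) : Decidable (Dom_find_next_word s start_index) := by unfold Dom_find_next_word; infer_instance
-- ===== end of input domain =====

-- B drops A's stateful index scan in favour of slicing + string library operations (lstrip / split); equal on Pre_.
-- ===== PORT A =====
-- A's while-loop: state = (word_start_index, current_index); word_end_index is only ever set right before a return.
def fnwLoopA (cs : List Char) (wsi : Int) (i : Nat) : Int × Int :=
  if h : i < cs.length then
    if wsi ≠ -1 ∧ cs[i] = ' ' then (wsi, (i : Int) - 1)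
    else fnwLoopA cs (if wsi = -1 ∧ cs[i] ≠ ' ' then (i : Int) else wsi) (i + 1)
  else if wsi = -1 then ((cs.length : Int), (cs.length : Int))
  else (wsi, (cs.length : Int) - 1)
termination_by cs.length - i

def find_next_word (s : String) (start_index : Int) : Int × Int :=
  let cs := s.toList
  if start_index > (cs.length : Int) - 1 ∨ start_index < 0 then
    ((cs.length : Int), (cs.length : Int))  -- Python raises ValueError here; excluded by Pre_
  else fnwLoopA cs (-1) start_index.toNat

-- ===== PORT B =====
def find_next_word_alt (s : String) (start_index : Int) : Int × Int :=
  let cs := s.toList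
  if start_index > (cs.length : Int) - 1 ∨ start_index < 0 then
    ((cs.length : Int), (cs.length : Int))  -- Python raises ValueError here; excluded by Pre_
  else
    let sub := cs.drop start_index.toNat                 -- s[start_index:] (start_index is in range here)
    let stripped := sub.dropWhile (· == ' ')             -- sub.lstrip(' ')
    if stripped = [] then ((cs.length : Int), (cs.length : Int))
    else
      let start : Int := start_index + ((sub.length - stripped.length : Nat) : Int)
      let word := stripped.takeWhile (· != ' ')          -- stripped.split(' ', 1)[0]
      (start, start + (word.length : Int) - 1)

-- ===== PRECONDITION & SPEC =====
-- Pre_ excludes exactly the inputs on which A raises ValueError (start_index outside [0, len(s)-1]).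
def Pre_find_next_word (s : String) (start_index : Int) : Prop :=
  0 ≤ start_index ∧ start_index < (s.toList.length : Int)
instance (s : String) (start_index : Int) : Decidable (Pre_find_next_word s start_index) := by unfold Pre_find_next_word; infer_instance
def pvWitness_find_next_word : String × Int := ("  hello world", 1)

def Spec_find_next_word (s : String) (start_index : Int) (out : Int × Int) : Prop := out = find_next_word_alt s start_index
instance (s : String) (start_index : Int) (out : Int × Int) : Decidable (Spec_find_next_word s start_index out) := by unfold Spec_find_next_word; infer_instance

-- ===== CLAIM (what is proved, stated in full; the proofs are below) =====
def Claim_equal_find_next_word : Prop := ∀ (s : String) (start_index : Int), Dom_find_next_word s start_index → Pre_find_next_word s start_index → Spec_find_next_word s start_index (find_next_word s start_index)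

-- ===== LEMMAS AND PROOFS =====

-- once a word start w ≠ -1 is recorded, A's loop hunts for the next space: its result is w plus the
-- length of the space-free prefix of the rest, i.e. B's takeWhile
lemma fnwLoopA_word (cs : List Char) (w : Int) (i : Nat) (hw : w ≠ -1) (hle : i ≤ cs.length) :
    fnwLoopA cs w i = (w, (i : Int) + (((cs.drop i).takeWhile (· != ' ')).length : Int) - 1) := by
  induction hk : cs.length - i generalizing i with
  | zero =>
    have hi : i = cs.length := by omega
    subst hi
    rw [fnwLoopA]
    simp [if_neg hw]
  | succ k ih =>
    have h : i < cs.length := by omega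
    have hdrop : cs.drop i = cs[i] :: cs.drop (i + 1) := (List.getElem_cons_drop h).symm
    rw [fnwLoopA]
    simp only [h, dif_pos]
    by_cases hc : cs[i] = ' '
    · rw [if_pos ⟨hw, hc⟩, hdrop]
      simp [hc]
    · rw [if_neg (fun hcon => hc hcon.2), if_neg (fun hcon => hw hcon.1)]
      rw [ih (i + 1) (by omega) (by omega), hdrop]
      simp only [List.takeWhile_cons]
      simp only [bne_iff_ne, ne_eq, hc, not_false_eq_true, if_pos, List.length_cons]
      simp only [Prod.mk.injEq]
      exact ⟨by trivial, by push_cast; ring⟩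

-- while the sentinel is still -1, A's loop computes exactly B's lstrip-by-length plus split word
lemma fnwLoopA_skip (cs : List Char) (i : Nat) (hle : i ≤ cs.length) :
    fnwLoopA cs (-1) i =
      (let sub := cs.drop i
       let stripped := sub.dropWhile (· == ' ')
       if stripped = [] then ((cs.length : Int), (cs.length : Int))
       else ((i : Int) + ((sub.length - stripped.length : Nat) : Int),
             (i : Int) + ((sub.length - stripped.length : Nat) : Int)
               + ((stripped.takeWhile (· != ' ')).length : Int) - 1)) := by
  induction hk : cs.length - i generalizing i with
  | zero =>
    have hi : i = cs.length := by omega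
    subst hi
    rw [fnwLoopA]
    simp
  | succ k ih =>
    have h : i < cs.length := by omega
    have hdrop : cs.drop i = cs[i] :: cs.drop (i + 1) := (List.getElem_cons_drop h).symm
    rw [fnwLoopA]
    simp only [h, dif_pos]
    by_cases hc : cs[i] = ' '
    · rw [if_neg (by simp [hc]), if_neg (by simp [hc]), ih (i + 1) (by omega) (by omega)]
      simp only [hdrop, List.dropWhile_cons, hc]
      simp only [beq_self_eq_true, if_pos, List.length_cons]
      have hlen : ((cs.drop (i + 1)).dropWhile (· == ' ')).length ≤ (cs.drop (i + 1)).length :=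
        List.length_dropWhile_le _ _
      split
      · rfl
      · have h1 : (cs.drop (i + 1)).length + 1 - ((cs.drop (i + 1)).dropWhile (· == ' ')).length
            = ((cs.drop (i + 1)).length - ((cs.drop (i + 1)).dropWhile (· == ' ')).length) + 1 := by omega
        rw [h1]
        simp only [Prod.mk.injEq]
        constructor <;> push_cast <;> omega
    · rw [if_neg (fun hcon => hcon.1 rfl), if_pos ⟨by trivial, hc⟩]
      have hw : ((i : Nat) : Int) ≠ -1 := by omega
      rw [fnwLoopA_word cs (i : Int) (i + 1) hw h]
      rw [hdrop, List.dropWhile_cons]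
      rw [if_neg (show ¬((cs[i] == ' ') = true) by simp [hc])]
      rw [if_neg (List.cons_ne_nil _ _)]
      rw [List.takeWhile_cons]
      rw [if_pos (show (cs[i] != ' ') = true by simp [hc])]
      simp only [List.length_cons, Prod.mk.injEq, Nat.sub_self]
      constructor <;> push_cast <;> omega

-- ===== VERDICT (by name: the statement is the Claim_ definition above) =====
theorem find_next_word_spec : Claim_equal_find_next_word := by
  intro s start_index _ hpre
  obtain ⟨h0, hlt⟩ := hpre
  unfold Spec_find_next_word find_next_word find_next_word_alt
  simp only []
  rw [if_neg (by omega), if_neg (by omega)]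
  rw [fnwLoopA_skip s.toList start_index.toNat (by omega)]
  have : ((start_index.toNat : Int)) = start_index := by omega
  simp only [this]
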